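-- pv_equiv track=rewrite | github.com/himanshusikarwar/dsa_problems | 8_generate_all_subarrays.py | solve
-- ===== SOURCE A (Python) =====
-- def solve(A):
--     n = len(A)
--     ans = []
--     for i in range(n):
--         for j in range(i,n):
--             cur = []
--             for k in range(i, j+1):
--                 cur.append(A[k])
--             ans.append(cur)
--     return ans
-- ===== SOURCE B (Python) =====
-- def solve(A):
--     n = len(A)
--     ans = []
--     for i in range(n):
--         cur = []
--         for j in range(i, n):
--             cur.append(A[j])
--             ans.append(list(cur))
--     return ans
-- ===== Notes on version B (the rewrite author's own statement) =====
-- stated objective: alternative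
-- what changed: B drops the innermost rebuild loop and maintains the current subarray incrementally per start index, snapshotting a copy at each extension.
import Mathlib
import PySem

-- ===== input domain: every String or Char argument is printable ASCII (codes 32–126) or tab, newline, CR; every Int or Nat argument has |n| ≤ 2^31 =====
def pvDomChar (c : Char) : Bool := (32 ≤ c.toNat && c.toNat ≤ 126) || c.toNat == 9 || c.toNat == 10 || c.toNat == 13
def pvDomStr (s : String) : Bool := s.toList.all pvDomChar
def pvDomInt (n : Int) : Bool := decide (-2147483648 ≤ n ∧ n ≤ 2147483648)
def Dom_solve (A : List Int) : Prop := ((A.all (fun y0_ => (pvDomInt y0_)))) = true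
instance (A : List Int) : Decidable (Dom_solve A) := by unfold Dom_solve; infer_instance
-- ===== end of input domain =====

-- B removes the innermost rebuild loop: it maintains the current subarray incrementally
-- per start index and snapshots a copy at each extension (a different decomposition).

-- ===== PORT A =====
def solve (A : List Int) : List (List Int) :=
  let n : Int := A.length
  (PySem.List.pyRange 0 n 1).foldl (fun ans i =>
    (PySem.List.pyRange i n 1).foldl (fun ans j =>
      ans ++ [(PySem.List.pyRange i (j + 1) 1).foldl
        (fun cur k => cur ++ [PySem.List.pyGetD A k 0]) []]) ans) []

-- ===== PORT B =====
def solve_alt (A : List Int) : List (List Int) :=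
  let n : Int := A.length
  (PySem.List.pyRange 0 n 1).foldl (fun ans i =>
    ((PySem.List.pyRange i n 1).foldl
      (fun (st : List Int × List (List Int)) j =>
        let cur := st.1 ++ [PySem.List.pyGetD A j 0]
        (cur, st.2 ++ [cur])) ([], ans)).2) []

-- ===== PRECONDITION & SPEC =====
def Spec_solve (A : List Int) (out : List (List Int)) : Prop := out = solve_alt A
instance (A : List Int) (out : List (List Int)) : Decidable (Spec_solve A out) := by unfold Spec_solve; infer_instance

-- ===== CLAIM (what is proved, stated in full; the proofs are below) =====
def Claim_equal_solve : Prop := ∀ (A : List Int), Dom_solve A → Spec_solve A (solve A)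

-- ===== LEMMAS AND PROOFS =====

-- B's inner loop with running subarray equals A's inner loop that rebuilds each subarray.
theorem inner_eq (g : Int → Int) (i n : Int) :
    ∀ (t : Nat) (m : Int), i ≤ m → (n - m).toNat = t → ∀ (ans : List (List Int)),
    ((PySem.List.pyRange m n 1).foldl
      (fun (st : List Int × List (List Int)) j =>
        let cur := st.1 ++ [g j]
        (cur, st.2 ++ [cur])) ((PySem.List.pyRange i m 1).map g, ans)).2
    = (PySem.List.pyRange m n 1).foldl
      (fun ans j => ans ++ [(PySem.List.pyRange i (j + 1) 1).map g]) ans := by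
  intro t
  induction t with
  | zero =>
    intro m _ ht ans
    rw [PySem.List.pyRange_one_eq_nil (show n ≤ m by omega)]
    rfl
  | succ t ih =>
    intro m him ht ans
    rw [PySem.List.pyRange_one_cons (show m < n by omega)]
    simp only [List.foldl_cons]
    have hstep : (PySem.List.pyRange i m 1).map g ++ [g m]
        = (PySem.List.pyRange i (m + 1) 1).map g := by
      rw [PySem.List.pyRange_one_succ_right him, List.map_append]; rfl
    rw [hstep]
    exact ih (m + 1) (by omega) (by omega) _

theorem rebuild_eq_map (A : List Int) (i : Int) (ans : List (List Int)) :
    (PySem.List.pyRange i (A.length : Int) 1).foldl (fun ans j =>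
        ans ++ [(PySem.List.pyRange i (j + 1) 1).foldl
          (fun cur k => cur ++ [PySem.List.pyGetD A k 0]) []]) ans
    = (PySem.List.pyRange i (A.length : Int) 1).foldl (fun ans j =>
        ans ++ [(PySem.List.pyRange i (j + 1) 1).map
          (fun k => PySem.List.pyGetD A k 0)]) ans := by
  have hf : (fun (acc : List (List Int)) (j : Int) =>
      acc ++ [(PySem.List.pyRange i (j + 1) 1).foldl
        (fun cur k => cur ++ [PySem.List.pyGetD A k 0]) []])
      = (fun (acc : List (List Int)) (j : Int) =>
      acc ++ [(PySem.List.pyRange i (j + 1) 1).map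
        (fun k => PySem.List.pyGetD A k 0)]) := by
    funext acc j
    rw [PySem.List.foldl_append_singleton_eq_map, List.nil_append]
  rw [hf]

theorem solve_eq_alt (A : List Int) : solve A = solve_alt A := by
  have hfun : (fun (ans : List (List Int)) (i : Int) =>
      (PySem.List.pyRange i (A.length : Int) 1).foldl (fun ans j =>
        ans ++ [(PySem.List.pyRange i (j + 1) 1).foldl
          (fun cur k => cur ++ [PySem.List.pyGetD A k 0]) []]) ans)
      = (fun (ans : List (List Int)) (i : Int) =>
      ((PySem.List.pyRange i (A.length : Int) 1).foldl
        (fun (st : List Int × List (List Int)) j =>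
          let cur := st.1 ++ [PySem.List.pyGetD A j 0]
          (cur, st.2 ++ [cur])) ([], ans)).2) := by
    funext ans i
    have h := inner_eq (fun k => PySem.List.pyGetD A k 0) i (A.length : Int) ((A.length : Int) - i).toNat i le_rfl rfl ans
    rw [PySem.List.pyRange_one_eq_nil (le_refl i)] at h
    simp only [List.map_nil] at h
    rw [rebuild_eq_map]
    exact h.symm
  show (PySem.List.pyRange 0 (A.length : Int) 1).foldl _ [] = (PySem.List.pyRange 0 (A.length : Int) 1).foldl _ []
  rw [hfun]

-- ===== VERDICT (by name: the statement is the Claim_ definition above) =====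
theorem solve_spec : Claim_equal_solve := by
  intro A _
  exact solve_eq_alt A
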